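-- pv_equiv track=rewrite | github.com/Aria-Dolatabadian/Python-tips | Generate numbers in range with specific average.py | permTable
-- ===== SOURCE A (Python) =====
-- def permTable(nc, sum, mn, mx):
--   t=[[0 for i in range(sum+1)] \
--     for j in range(nc+1)]
--   t[0][0]=1
--   for i in range(1,nc+1):
--     for j in range(0,sum+1):
--       jm=max(j-(mx-mn), 0)
--       v=0
--       for k in range(jm, j+1): v+=t[i-1][k]
--       t[i][j]=v
--   return t
-- ===== SOURCE B (Python) =====
-- def permTable(nc, sum, mn, mx):
--     # Same table, built row by row with prefix sums: each entry is a
--     # difference of two prefix sums of the previous row instead of an inner scan.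
--     w = mx - mn
--     row = [1] + [0] * sum
--     t = [row]
--     for _ in range(nc):
--         pref = [0]
--         for x in row:
--             pref.append(pref[-1] + x)
--         row = [pref[j + 1] - pref[lo] if (lo := max(j - w, 0)) <= j else 0
--                for j in range(sum + 1)]
--         t.append(row)
--     return t
-- ===== Notes on version B (the rewrite author's own statement) =====
-- stated objective: alternative
-- what changed: Replaces the inner summation loop per cell by prefix sums of the previous row (each cell is a difference of two prefix sums), and builds the table row by row instead of mutating a preallocated zero table.
import Mathlib
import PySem

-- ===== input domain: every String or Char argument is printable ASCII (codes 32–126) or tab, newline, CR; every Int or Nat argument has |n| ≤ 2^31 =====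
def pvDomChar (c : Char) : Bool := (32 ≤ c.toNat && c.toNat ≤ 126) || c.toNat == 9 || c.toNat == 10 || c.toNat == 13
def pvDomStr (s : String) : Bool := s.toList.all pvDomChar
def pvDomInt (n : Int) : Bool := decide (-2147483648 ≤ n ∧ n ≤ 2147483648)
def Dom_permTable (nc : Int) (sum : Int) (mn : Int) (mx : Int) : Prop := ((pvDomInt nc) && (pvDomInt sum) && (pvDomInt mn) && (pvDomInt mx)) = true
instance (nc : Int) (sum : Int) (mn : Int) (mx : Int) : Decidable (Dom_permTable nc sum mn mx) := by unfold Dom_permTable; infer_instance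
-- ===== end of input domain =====

-- B builds the same table row by row, each cell a difference of two prefix sums of the previous
-- row instead of A's inner summation loop; proved equal to A on Pre_ (nc ≥ 0, sum ≥ 0).


set_option maxHeartbeats 1000000

-- ===== PORT A =====
-- Literal port of A: preallocated (nc+1)×(sum+1) zero table, t[0][0]=1, triple loop.
-- All indices written/read are nonnegative and in range under Pre_, so the total
-- pySetD/pyGetD forms are exact there.
def permTable (nc : Int) (sum : Int) (mn : Int) (mx : Int) : List (List Int) :=
  let t : List (List Int) :=
    (PySem.List.pyRange 0 (nc + 1) 1).map (fun _ =>
      (PySem.List.pyRange 0 (sum + 1) 1).map (fun _ => (0 : Int)))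
  let t := PySem.List.pySetD t 0 (PySem.List.pySetD (PySem.List.pyGetD t 0 []) 0 1)
  (PySem.List.pyRange 1 (nc + 1) 1).foldl (fun t i =>
    (PySem.List.pyRange 0 (sum + 1) 1).foldl (fun t j =>
      let jm := max (j - (mx - mn)) 0
      let v := (PySem.List.pyRange jm (j + 1) 1).foldl
        (fun v k => v + PySem.List.pyGetD (PySem.List.pyGetD t (i - 1) []) k 0) 0
      PySem.List.pySetD t i (PySem.List.pySetD (PySem.List.pyGetD t i []) j v)) t) t

-- ===== PORT B =====
-- Port of B (Source B): row-by-row construction; pref is the prefix-sum list of the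
-- previous row ([0]*sum is empty for sum ≤ 0, hence List.replicate sum.toNat 0).
def permTable_alt (nc : Int) (sum : Int) (mn : Int) (mx : Int) : List (List Int) :=
  let w := mx - mn
  let row0 : List Int := [1] ++ List.replicate sum.toNat 0
  let step : List Int → List Int := fun row =>
    let pref := row.foldl (fun pref x => pref ++ [PySem.List.pyGetD pref (-1) 0 + x]) [(0 : Int)]
    (PySem.List.pyRange 0 (sum + 1) 1).map (fun j =>
      let lo := max (j - w) 0
      if lo ≤ j then PySem.List.pyGetD pref (j + 1) 0 - PySem.List.pyGetD pref lo 0 else 0)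
  ((PySem.List.pyRange 0 nc 1).foldl
    (fun (st : List (List Int) × List Int) _ =>
      let row := step st.2
      (st.1 ++ [row], row)) ([row0], row0)).1

-- ===== PRECONDITION & SPEC =====
-- Pre_ excludes exactly the inputs where A raises IndexError: for nc < 0 or sum < 0
-- the table (or its first row) is empty and t[0][0]=1 fails.
def Pre_permTable (nc : Int) (sum : Int) (mn : Int) (mx : Int) : Prop := 0 ≤ nc ∧ 0 ≤ sum
instance (nc : Int) (sum : Int) (mn : Int) (mx : Int) : Decidable (Pre_permTable nc sum mn mx) := by unfold Pre_permTable; infer_instance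
def pvWitness_permTable : Int × Int × Int × Int := (3, 4, 1, 3)

def Spec_permTable (nc : Int) (sum : Int) (mn : Int) (mx : Int) (out : List (List Int)) : Prop := out = permTable_alt nc sum mn mx
instance (nc : Int) (sum : Int) (mn : Int) (mx : Int) (out : List (List Int)) : Decidable (Spec_permTable nc sum mn mx out) := by unfold Spec_permTable; infer_instance

-- ===== CLAIM (what is proved, stated in full; the proofs are below) =====
def Claim_equal_permTable : Prop := ∀ (nc : Int) (sum : Int) (mn : Int) (mx : Int), Dom_permTable nc sum mn mx → Pre_permTable nc sum mn mx → Spec_permTable nc sum mn mx (permTable nc sum mn mx)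

-- ===== LEMMAS AND PROOFS =====

-- A row of length m with entries given by f.
def mkRow (f : Nat → Int) (m : Nat) : List Int := (List.range m).map f

-- The window sum of A's inner loop over an abstract previous row f.
def winF (w : Int) (f : Nat → Int) (j : Int) : Int :=
  (PySem.List.pyRange (max (j - w) 0) (j + 1) 1).foldl (fun v k => v + f k.toNat) 0

-- The mathematical rows of the table both programs compute.
def rowR (w : Int) : Nat → Nat → Int
  | 0 => fun l => if l = 0 then 1 else 0
  | m + 1 => fun l => winF w (rowR w m) (l : Int)

def tbl (w : Int) (N S : Nat) : List (List Int) :=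
  (List.range (N + 1)).map (fun k => mkRow (rowR w k) (S + 1))

-- A's table with rows 0..b computed and the rest still zero.
def gT (w : Int) (N S : Nat) (b : Nat) : List (List Int) :=
  (List.range (N + 1)).map (fun k =>
    if k ≤ b then mkRow (rowR w k) (S + 1) else mkRow (fun _ => 0) (S + 1))

-- A's table in the middle of the inner loop: row m+1 filled up to column j.
def pT (w : Int) (N S : Nat) (m : Nat) (j : Int) : List (List Int) :=
  (List.range (N + 1)).map (fun k =>
    if k = m + 1 then mkRow (fun l => if (l : Int) < j then rowR w (m + 1) l else 0) (S + 1)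
    else if k ≤ m then mkRow (rowR w k) (S + 1) else mkRow (fun _ => 0) (S + 1))

-- A's table after the inner loop for row m+1.
def fT (w : Int) (N S : Nat) (m : Nat) : List (List Int) :=
  (List.range (N + 1)).map (fun k =>
    if k = m + 1 then mkRow (rowR w (m + 1)) (S + 1)
    else if k ≤ m then mkRow (rowR w k) (S + 1) else mkRow (fun _ => 0) (S + 1))

theorem mkRow_congr (f g : Nat → Int) (m : Nat) (h : ∀ l, l < m → f l = g l) :
    mkRow f m = mkRow g m := by
  unfold mkRow
  apply List.map_congr_left
  intro a ha
  exact h a (List.mem_range.mp ha)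

theorem length_mkRow (f : Nat → Int) (m : Nat) : (mkRow f m).length = m := by
  simp [mkRow]

theorem set_map_range {α : Type} (n k : Nat) (g : Nat → α) (v : α) (hk : k < n) :
    ((List.range n).map g).set k v = (List.range n).map (fun x => if x = k then v else g x) := by
  apply List.ext_getElem
  · simp
  · intro i h1 h2
    simp only [List.getElem_set, List.getElem_map, List.getElem_range]
    by_cases h : i = k
    · simp [h]
    · simp [h, Ne.symm h]

theorem pyGetD_map_range {α : Type} (n : Nat) (g : Nat → α) (i : Int) (d : α)
    (h0 : 0 ≤ i) (h : i < (n : Int)) :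
    PySem.List.pyGetD ((List.range n).map g) i d = g i.toNat := by
  rw [PySem.List.pyGetD_eq_getElem _ d h0 (by simpa using h)]
  simp

theorem mkRow_set (f : Nat → Int) (m k : Nat) (v : Int) (hk : k < m) :
    (mkRow f m).set k v = mkRow (fun x => if x = k then v else f x) m :=
  set_map_range m k f v hk

theorem pyGetD_mkRow (f : Nat → Int) (m : Nat) (i : Int) (d : Int)
    (h0 : 0 ≤ i) (h : i < (m : Int)) :
    PySem.List.pyGetD (mkRow f m) i d = f i.toNat :=
  pyGetD_map_range m f i d h0 h

theorem zrow_eq (sum : Int) (S : Nat) (hs : sum = (S : Int)) :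
    (PySem.List.pyRange 0 (sum + 1) 1).map (fun _ => (0 : Int)) = mkRow (fun _ => 0) (S + 1) := by
  rw [PySem.List.pyRange_one, List.map_map]
  rw [show (sum + 1 - 0).toNat = S + 1 by omega]
  rfl

theorem row0_eq (w : Int) (S : Nat) :
    mkRow (fun x => if x = 0 then (1 : Int) else (fun _ => (0 : Int)) x) (S + 1)
      = mkRow (rowR w 0) (S + 1) := by
  apply mkRow_congr
  intro l _
  simp only [rowR]

-- ===== prefix sums (B side) =====

def prefOf : List Int → Int → List Int
  | [], _ => []
  | x :: xs, a => (a + x) :: prefOf xs (a + x)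

theorem foldl_pref (row : List Int) : ∀ (p : List Int) (a : Int),
    row.foldl (fun pref x => pref ++ [PySem.List.pyGetD pref (-1) 0 + x]) (p ++ [a])
      = (p ++ [a]) ++ prefOf row a := by
  induction row with
  | nil => intro p a; simp [prefOf]
  | cons x xs ih =>
    intro p a
    simp only [List.foldl_cons, PySem.List.pyGetD_neg_one_append_singleton]
    rw [ih (p ++ [a]) (a + x)]
    simp [prefOf]

theorem prefOf_getD (row : List Int) : ∀ (a : Int) (k : Nat), k < row.length →
    (prefOf row a).getD k 0 = a + (row.take (k + 1)).sum := by
  induction row with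
  | nil => intro a k h; simp at h
  | cons x xs ih =>
    intro a k h
    cases k with
    | zero => simp [prefOf]
    | succ k =>
      simp only [prefOf, List.getD_cons_succ]
      rw [ih (a + x) k (by simpa using h)]
      simp only [List.take_succ_cons, List.sum_cons]
      ring

theorem pref_getD (row : List Int) (m : Int) (h0 : 0 ≤ m) (hm : m ≤ (row.length : Int)) :
    PySem.List.pyGetD
        (row.foldl (fun pref x => pref ++ [PySem.List.pyGetD pref (-1) 0 + x]) [(0 : Int)]) m 0
      = (row.take m.toNat).sum := by
  have h := foldl_pref row [] 0
  simp only [List.nil_append] at h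
  rw [h]
  rw [show m = ((m.toNat : Nat) : Int) by omega, PySem.List.pyGetD_natCast]
  rcases hk : m.toNat with _ | k
  · simp
  · have hk' : k < row.length := by omega
    simp only [List.singleton_append, List.getD_cons_succ]
    rw [prefOf_getD row 0 k hk']
    simp

theorem sum_range_take (f : Nat → Int) (m : Nat) : ∀ (n : Nat), n ≤ m →
    ((PySem.List.pyRange 0 (n : Int) 1).map (fun k => f k.toNat)).sum
      = (((List.range m).map f).take n).sum := by
  intro n
  induction n with
  | zero =>
    intro _
    rw [PySem.List.pyRange_one_eq_nil (by omega)]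
    simp
  | succ n ih =>
    intro h
    rw [show ((n + 1 : Nat) : Int) = (n : Int) + 1 by push_cast; ring]
    rw [PySem.List.pyRange_one_succ_right (by omega)]
    rw [List.map_append, List.sum_append, ih (by omega)]
    rw [List.take_add_one, List.sum_append]
    have hn : n < m := by omega
    simp [hn]

-- B's list-comprehension entry equals A's inner window sum.
theorem stepB_entry (w : Int) (f : Nat → Int) (S : Nat) (j : Int)
    (hj0 : 0 ≤ j) (hj : j ≤ (S : Int)) :
    (if max (j - w) 0 ≤ j then
        PySem.List.pyGetD
            ((mkRow f (S + 1)).foldl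
              (fun pref x => pref ++ [PySem.List.pyGetD pref (-1) 0 + x]) [(0 : Int)]) (j + 1) 0
          - PySem.List.pyGetD
            ((mkRow f (S + 1)).foldl
              (fun pref x => pref ++ [PySem.List.pyGetD pref (-1) 0 + x]) [(0 : Int)]) (max (j - w) 0) 0
      else 0)
      = winF w f j := by
  have hlen : ((mkRow f (S + 1)).length : Int) = (S : Int) + 1 := by
    rw [length_mkRow]; push_cast; ring
  by_cases hc : max (j - w) 0 ≤ j
  · rw [if_pos hc]
    rw [pref_getD _ (j + 1) (by omega) (by omega)]
    rw [pref_getD _ (max (j - w) 0) (by omega) (by omega)]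
    unfold winF
    rw [PySem.List.foldl_add]
    have hsplit := PySem.List.pyRange_one_append 0 (max (j - w) 0) (j + 1) (by omega) (by omega)
    have e0 : ((PySem.List.pyRange 0 (j + 1) 1).map (fun k => f k.toNat)).sum
        = ((PySem.List.pyRange 0 (max (j - w) 0) 1).map (fun k => f k.toNat)).sum
          + ((PySem.List.pyRange (max (j - w) 0) (j + 1) 1).map (fun k => f k.toNat)).sum := by
      rw [hsplit, List.map_append, List.sum_append]
    have e1 : ((PySem.List.pyRange 0 (j + 1) 1).map (fun k => f k.toNat)).sum
        = ((mkRow f (S + 1)).take (j + 1).toNat).sum := by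
      rw [show (j + 1) = (((j + 1).toNat : Nat) : Int) by omega]
      rw [show ((((j + 1).toNat : Nat) : Int)).toNat = (j + 1).toNat by omega]
      exact sum_range_take f (S + 1) (j + 1).toNat (by omega)
    have e2 : ((PySem.List.pyRange 0 (max (j - w) 0) 1).map (fun k => f k.toNat)).sum
        = ((mkRow f (S + 1)).take (max (j - w) 0).toNat).sum := by
      rw [show (max (j - w) 0) = (((max (j - w) 0).toNat : Nat) : Int) by omega]
      rw [show ((((max (j - w) 0).toNat : Nat) : Int)).toNat = (max (j - w) 0).toNat by omega]
      exact sum_range_take f (S + 1) (max (j - w) 0).toNat (by omega)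
    omega
  · rw [if_neg hc]
    unfold winF
    rw [PySem.List.pyRange_one_eq_nil (by omega : j + 1 ≤ max (j - w) 0)]
    rfl

-- One application of B's step to the m-th row yields the (m+1)-st row.
theorem stepEq (w sum : Int) (S : Nat) (hs : sum = (S : Int)) (m : Nat) :
    ((PySem.List.pyRange 0 (sum + 1) 1).map (fun j =>
        if max (j - w) 0 ≤ j then
          PySem.List.pyGetD
              ((mkRow (rowR w m) (S + 1)).foldl
                (fun pref x => pref ++ [PySem.List.pyGetD pref (-1) 0 + x]) [(0 : Int)]) (j + 1) 0
            - PySem.List.pyGetD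
              ((mkRow (rowR w m) (S + 1)).foldl
                (fun pref x => pref ++ [PySem.List.pyGetD pref (-1) 0 + x]) [(0 : Int)]) (max (j - w) 0) 0
        else 0))
      = mkRow (rowR w (m + 1)) (S + 1) := by
  rw [PySem.List.pyRange_one, List.map_map]
  rw [show (sum + 1 - 0).toNat = S + 1 by omega]
  unfold mkRow
  apply List.map_congr_left
  intro k hk
  have hk' : k < S + 1 := List.mem_range.mp hk
  simp only [Function.comp_apply, zero_add]
  have h := stepB_entry w (rowR w m) S (k : Int) (by omega) (by omega)
  exact h

-- B's accumulation loop.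
theorem outerB (w : Int) (N S : Nat) (nc : Int) (hn : nc = (N : Int))
    (F : List Int → List Int)
    (hF : ∀ m : Nat, F (mkRow (rowR w m) (S + 1)) = mkRow (rowR w (m + 1)) (S + 1)) :
    ∀ (c : Nat) (i : Int) (m : Nat), i = (m : Int) → i + (c : Int) = nc →
    ((PySem.List.pyRange i nc 1).foldl
        (fun (st : List (List Int) × List Int) _ => (st.1 ++ [F st.2], F st.2))
        ((List.range (m + 1)).map (fun k => mkRow (rowR w k) (S + 1)), mkRow (rowR w m) (S + 1))).1
      = (List.range (N + 1)).map (fun k => mkRow (rowR w k) (S + 1)) := by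
  intro c
  induction c with
  | zero =>
    intro i m him hc
    have hm : m = N := by omega
    subst hm
    rw [PySem.List.pyRange_one_eq_nil (show nc ≤ i by omega)]
    simp only [List.foldl_nil]
  | succ c ih =>
    intro i m him hc
    rw [PySem.List.pyRange_one_cons (by omega : i < nc), List.foldl_cons]
    show ((PySem.List.pyRange (i + 1) nc 1).foldl
        (fun (st : List (List Int) × List Int) _ => (st.1 ++ [F st.2], F st.2))
        ((List.range (m + 1)).map (fun k => mkRow (rowR w k) (S + 1)) ++ [F (mkRow (rowR w m) (S + 1))],
          F (mkRow (rowR w m) (S + 1)))).1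
      = (List.range (N + 1)).map (fun k => mkRow (rowR w k) (S + 1))
    rw [hF m]
    rw [show (List.range (m + 1)).map (fun k => mkRow (rowR w k) (S + 1)) ++ [mkRow (rowR w (m + 1)) (S + 1)]
        = (List.range (m + 1 + 1)).map (fun k => mkRow (rowR w k) (S + 1)) by
      rw [List.range_succ (n := m + 1), List.map_append]; rfl]
    exact ih (i + 1) (m + 1) (by omega) (by omega)

theorem lemB (nc sum mn mx : Int) (h1 : 0 ≤ nc) (h2 : 0 ≤ sum) :
    permTable_alt nc sum mn mx = tbl (mx - mn) nc.toNat sum.toNat := by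
  have hn : nc = ((nc.toNat : Nat) : Int) := by omega
  have hrow0 : ([(1 : Int)] ++ List.replicate sum.toNat 0) = mkRow (rowR (mx - mn) 0) (sum.toNat + 1) := by
    rw [← row0_eq (mx - mn) sum.toNat]
    unfold mkRow
    rw [List.range_succ_eq_map, List.map_cons, List.map_map]
    rw [show ((fun x => if x = 0 then (1 : Int) else (fun _ => (0 : Int)) x) ∘ Nat.succ)
        = (fun _ => (0 : Int)) from funext (fun x => by simp)]
    rw [List.map_const', List.length_range]
    rfl
  show ((PySem.List.pyRange 0 nc 1).foldl
      (fun (st : List (List Int) × List Int) _ =>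
        (st.1 ++ [(PySem.List.pyRange 0 (sum + 1) 1).map (fun j =>
            if max (j - (mx - mn)) 0 ≤ j then
              PySem.List.pyGetD (st.2.foldl
                  (fun pref x => pref ++ [PySem.List.pyGetD pref (-1) 0 + x]) [(0 : Int)]) (j + 1) 0
                - PySem.List.pyGetD (st.2.foldl
                  (fun pref x => pref ++ [PySem.List.pyGetD pref (-1) 0 + x]) [(0 : Int)]) (max (j - (mx - mn)) 0) 0
            else 0)],
          (PySem.List.pyRange 0 (sum + 1) 1).map (fun j =>
            if max (j - (mx - mn)) 0 ≤ j then
              PySem.List.pyGetD (st.2.foldl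
                  (fun pref x => pref ++ [PySem.List.pyGetD pref (-1) 0 + x]) [(0 : Int)]) (j + 1) 0
                - PySem.List.pyGetD (st.2.foldl
                  (fun pref x => pref ++ [PySem.List.pyGetD pref (-1) 0 + x]) [(0 : Int)]) (max (j - (mx - mn)) 0) 0
            else 0)))
      ([[(1 : Int)] ++ List.replicate sum.toNat 0], [(1 : Int)] ++ List.replicate sum.toNat 0)).1
    = tbl (mx - mn) nc.toNat sum.toNat
  rw [hrow0]
  exact outerB (mx - mn) nc.toNat sum.toNat nc hn
    (fun row => (PySem.List.pyRange 0 (sum + 1) 1).map (fun j =>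
      if max (j - (mx - mn)) 0 ≤ j then
        PySem.List.pyGetD (row.foldl
            (fun pref x => pref ++ [PySem.List.pyGetD pref (-1) 0 + x]) [(0 : Int)]) (j + 1) 0
          - PySem.List.pyGetD (row.foldl
            (fun pref x => pref ++ [PySem.List.pyGetD pref (-1) 0 + x]) [(0 : Int)]) (max (j - (mx - mn)) 0) 0
      else 0))
    (fun m => stepEq (mx - mn) sum sum.toNat (by omega) m)
    nc.toNat 0 0 (by omega) (by omega)

-- ===== A side =====

theorem innerA (w : Int) (N S : Nat) (sum : Int) (hs : sum = (S : Int))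
    (i : Int) (m : Nat) (hi : i = (m : Int) + 1) (hm : m + 1 ≤ N) :
    ∀ (c : Nat) (j : Int), 0 ≤ j → j + (c : Int) = sum + 1 →
    (PySem.List.pyRange j (sum + 1) 1).foldl
      (fun t j =>
        PySem.List.pySetD t i
          (PySem.List.pySetD (PySem.List.pyGetD t i []) j
            ((PySem.List.pyRange (max (j - w) 0) (j + 1) 1).foldl
              (fun v k => v + PySem.List.pyGetD (PySem.List.pyGetD t (i - 1) []) k 0) 0)))
      (pT w N S m j)
    = fT w N S m := by
  intro c
  induction c with
  | zero =>
    intro j hj0 hjc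
    rw [PySem.List.pyRange_one_eq_nil (show sum + 1 ≤ j by omega)]
    simp only [List.foldl_nil]
    unfold pT fT
    apply List.map_congr_left
    intro k _
    by_cases hk : k = m + 1
    · simp only [if_pos hk]
      apply mkRow_congr
      intro l hl
      rw [if_pos (by omega : (l : Int) < j)]
    · simp only [if_neg hk]
  | succ c ih =>
    intro j hj0 hjc
    rw [PySem.List.pyRange_one_cons (by omega : j < sum + 1), List.foldl_cons]
    have hread : PySem.List.pyGetD (pT w N S m j) (i - 1) [] = mkRow (rowR w m) (S + 1) := by
      unfold pT
      rw [hi, show (m : Int) + 1 - 1 = ((m : Nat) : Int) by ring]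
      rw [pyGetD_map_range (N + 1) _ ((m : Nat) : Int) [] (by omega) (by omega)]
      simp
    have hrow : PySem.List.pyGetD (pT w N S m j) i []
        = mkRow (fun l => if (l : Int) < j then rowR w (m + 1) l else 0) (S + 1) := by
      unfold pT
      rw [hi]
      rw [pyGetD_map_range (N + 1) _ ((m : Int) + 1) [] (by omega) (by omega)]
      rw [show ((m : Int) + 1).toNat = m + 1 by omega]
      simp
    have hv : (PySem.List.pyRange (max (j - w) 0) (j + 1) 1).foldl
        (fun v k => v + PySem.List.pyGetD (mkRow (rowR w m) (S + 1)) k 0) 0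
        = rowR w (m + 1) j.toNat := by
      rw [PySem.List.foldl_congr_mem (PySem.List.pyRange (max (j - w) 0) (j + 1) 1)
        (fun v k => v + PySem.List.pyGetD (mkRow (rowR w m) (S + 1)) k 0)
        (fun v k => v + rowR w m k.toNat) 0
        (by intro acc x hx
            rw [PySem.List.mem_pyRange_one] at hx
            show acc + PySem.List.pyGetD (mkRow (rowR w m) (S + 1)) x 0 = acc + rowR w m x.toNat
            rw [pyGetD_mkRow (rowR w m) (S + 1) x 0 (by omega) (by omega)])]
      show winF w (rowR w m) j = _
      simp only [rowR]
      congr 1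
      omega
    have hset1 : PySem.List.pySetD
        (mkRow (fun l => if (l : Int) < j then rowR w (m + 1) l else 0) (S + 1)) j
        (rowR w (m + 1) j.toNat)
        = mkRow (fun l => if (l : Int) < j + 1 then rowR w (m + 1) l else 0) (S + 1) := by
      rw [PySem.List.pySetD_of_nonneg _ _ hj0]
      rw [mkRow_set _ _ _ _ (by omega : j.toNat < S + 1)]
      apply mkRow_congr
      intro l hl
      by_cases hlj : l = j.toNat
      · rw [if_pos hlj, if_pos (by omega : (l : Int) < j + 1), hlj]
      · rw [if_neg hlj]
        by_cases h2 : (l : Int) < j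
        · rw [if_pos h2, if_pos (by omega)]
        · rw [if_neg h2, if_neg (by omega)]
    have hset2 : PySem.List.pySetD (pT w N S m j) i
        (mkRow (fun l => if (l : Int) < j + 1 then rowR w (m + 1) l else 0) (S + 1))
        = pT w N S m (j + 1) := by
      unfold pT
      rw [PySem.List.pySetD_of_nonneg _ _ (by omega)]
      rw [show i.toNat = m + 1 by omega]
      rw [set_map_range (N + 1) (m + 1) _ _ (by omega)]
      apply List.map_congr_left
      intro k _
      by_cases hk : k = m + 1
      · rw [if_pos hk, if_pos hk]
      · rw [if_neg hk, if_neg hk, if_neg hk]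
    rw [hread, hv, hrow, hset1, hset2]
    exact ih (j + 1) (by omega) (by omega)

theorem outerA (w : Int) (N S : Nat) (nc sum : Int) (hn : nc = (N : Int)) (hs : sum = (S : Int)) :
    ∀ (c : Nat) (i : Int), 1 ≤ i → i + (c : Int) = nc + 1 →
    (PySem.List.pyRange i (nc + 1) 1).foldl
      (fun t i =>
        (PySem.List.pyRange 0 (sum + 1) 1).foldl
          (fun t j =>
            PySem.List.pySetD t i
              (PySem.List.pySetD (PySem.List.pyGetD t i []) j
                ((PySem.List.pyRange (max (j - w) 0) (j + 1) 1).foldl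
                  (fun v k => v + PySem.List.pyGetD (PySem.List.pyGetD t (i - 1) []) k 0) 0))) t)
      (gT w N S (i.toNat - 1))
    = gT w N S N := by
  intro c
  induction c with
  | zero =>
    intro i hi1 hic
    rw [PySem.List.pyRange_one_eq_nil (show nc + 1 ≤ i by omega)]
    simp only [List.foldl_nil]
    rw [show i.toNat - 1 = N by omega]
  | succ c ih =>
    intro i hi1 hic
    rw [PySem.List.pyRange_one_cons (by omega : i < nc + 1), List.foldl_cons]
    have him : i = ((i.toNat - 1 : Nat) : Int) + 1 := by omega
    have hmN : (i.toNat - 1) + 1 ≤ N := by omega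
    have hstart : gT w N S (i.toNat - 1) = pT w N S (i.toNat - 1) 0 := by
      unfold gT pT
      apply List.map_congr_left
      intro k _
      by_cases hk : k = (i.toNat - 1) + 1
      · rw [if_pos hk, if_neg (by omega : ¬ k ≤ i.toNat - 1)]
        apply mkRow_congr
        intro l _
        rw [if_neg (by omega : ¬ ((l : Int) < 0))]
      · rw [if_neg hk]
    rw [hstart]
    rw [innerA w N S sum hs i (i.toNat - 1) him hmN (S + 1) 0 le_rfl (by omega)]
    have hnext : fT w N S (i.toNat - 1) = gT w N S ((i + 1).toNat - 1) := by
      unfold fT gT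
      apply List.map_congr_left
      intro k _
      have he : (i + 1).toNat - 1 = (i.toNat - 1) + 1 := by omega
      rw [he]
      by_cases hk : k = (i.toNat - 1) + 1
      · rw [if_pos hk, if_pos (by omega), hk]
      · rw [if_neg hk]
        by_cases hk2 : k ≤ i.toNat - 1
        · rw [if_pos hk2, if_pos (by omega)]
        · rw [if_neg hk2, if_neg (by omega)]
    rw [hnext]
    exact ih (i + 1) (by omega) (by omega)

theorem lemA (nc sum mn mx : Int) (h1 : 0 ≤ nc) (h2 : 0 ≤ sum) :
    permTable nc sum mn mx = tbl (mx - mn) nc.toNat sum.toNat := by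
  have hn : nc = ((nc.toNat : Nat) : Int) := by omega
  have hs : sum = ((sum.toNat : Nat) : Int) := by omega
  have ht0 : (PySem.List.pyRange 0 (nc + 1) 1).map (fun _ =>
        (PySem.List.pyRange 0 (sum + 1) 1).map (fun _ => (0 : Int)))
      = (List.range (nc.toNat + 1)).map (fun _ => mkRow (fun _ => 0) (sum.toNat + 1)) := by
    rw [zrow_eq sum sum.toNat (by omega), PySem.List.pyRange_one, List.map_map]
    rw [show (nc + 1 - 0).toNat = nc.toNat + 1 by omega]
    rfl
  show (PySem.List.pyRange 1 (nc + 1) 1).foldl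
      (fun t i =>
        (PySem.List.pyRange 0 (sum + 1) 1).foldl
          (fun t j =>
            PySem.List.pySetD t i
              (PySem.List.pySetD (PySem.List.pyGetD t i []) j
                ((PySem.List.pyRange (max (j - (mx - mn)) 0) (j + 1) 1).foldl
                  (fun v k => v + PySem.List.pyGetD (PySem.List.pyGetD t (i - 1) []) k 0) 0))) t)
      (PySem.List.pySetD
        ((PySem.List.pyRange 0 (nc + 1) 1).map (fun _ =>
          (PySem.List.pyRange 0 (sum + 1) 1).map (fun _ => (0 : Int)))) 0
        (PySem.List.pySetD
          (PySem.List.pyGetD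
            ((PySem.List.pyRange 0 (nc + 1) 1).map (fun _ =>
              (PySem.List.pyRange 0 (sum + 1) 1).map (fun _ => (0 : Int)))) 0 []) 0 1))
    = tbl (mx - mn) nc.toNat sum.toNat
  rw [ht0]
  have hget0 : PySem.List.pyGetD
      ((List.range (nc.toNat + 1)).map (fun _ => mkRow (fun _ => (0 : Int)) (sum.toNat + 1))) 0 []
      = mkRow (fun _ => 0) (sum.toNat + 1) := by
    rw [pyGetD_map_range (nc.toNat + 1) _ 0 [] (by omega) (by omega)]
  rw [hget0]
  have hsetrow : PySem.List.pySetD (mkRow (fun _ => (0 : Int)) (sum.toNat + 1)) 0 1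
      = mkRow (rowR (mx - mn) 0) (sum.toNat + 1) := by
    rw [PySem.List.pySetD_of_nonneg _ _ (by omega)]
    rw [show (0 : Int).toNat = 0 from rfl]
    rw [mkRow_set _ _ _ _ (by omega)]
    exact row0_eq (mx - mn) sum.toNat
  rw [hsetrow]
  have hsettbl : PySem.List.pySetD
      ((List.range (nc.toNat + 1)).map (fun _ => mkRow (fun _ => (0 : Int)) (sum.toNat + 1))) 0
      (mkRow (rowR (mx - mn) 0) (sum.toNat + 1))
      = gT (mx - mn) nc.toNat sum.toNat 0 := by
    rw [PySem.List.pySetD_of_nonneg _ _ (by omega)]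
    rw [show (0 : Int).toNat = 0 from rfl]
    rw [set_map_range (nc.toNat + 1) 0 _ _ (by omega)]
    unfold gT
    apply List.map_congr_left
    intro k _
    by_cases hk : k = 0
    · rw [if_pos hk, if_pos (by omega), hk]
    · rw [if_neg hk, if_neg (by omega)]
  rw [hsettbl]
  have hend : gT (mx - mn) nc.toNat sum.toNat nc.toNat = tbl (mx - mn) nc.toNat sum.toNat := by
    unfold gT tbl
    apply List.map_congr_left
    intro k hk
    rw [if_pos (Nat.le_of_lt_succ (List.mem_range.mp hk))]
  exact (outerA (mx - mn) nc.toNat sum.toNat nc sum hn hs nc.toNat 1 (by omega) (by omega)).trans hend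

-- ===== VERDICT (by name: the statement is the Claim_ definition above) =====
theorem permTable_spec : Claim_equal_permTable := by
  intro nc sum mn mx _ hpre
  unfold Spec_permTable
  rw [lemA nc sum mn mx hpre.1 hpre.2, lemB nc sum mn mx hpre.1 hpre.2]
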